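-- pv_equiv track=rewrite | github.com/pro99d/race-game | hh.py | merge_sorted_lests
-- ===== SOURCE A (Python) =====
-- def merge_sorted_lests(lest1, lest2):
--     res = []
--     for i in range(max(len(lest1), len(lest2))):
--         if i < min(len(lest2), len(lest1)):
--             res.append(min(lest1[i], lest2[i]))
--             res.append(max(lest1[i], lest2[i]))
--         else:
--             if len(lest1) < len(lest2):
--                 res.append(lest2[i])
--             else:
--                 res.append(lest1[i])
--     return res
-- ===== SOURCE B (Python) =====
-- def merge_sorted_lests(lest1, lest2):
--     s1, s2 = lest1[::-1], lest2[::-1]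
--     res = []
--     while s1 and s2:
--         a, b = s1.pop(), s2.pop()
--         res.append(min(a, b))
--         res.append(max(a, b))
--     rest = s1 if s1 else s2
--     rest.reverse()
--     return res + rest
-- ===== Notes on version B (the rewrite author's own statement) =====
-- stated objective: alternative
-- what changed: Replaces A's single indexed loop over range(max(len1,len2)) with per-step length comparisons by a stack-consumption design: both lists are reversed into stacks, a while loop pops one element from each and emits min/max until a stack empties, and the surviving stack is reversed back and appended; no index or length arithmetic at all.
import Mathlib
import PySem

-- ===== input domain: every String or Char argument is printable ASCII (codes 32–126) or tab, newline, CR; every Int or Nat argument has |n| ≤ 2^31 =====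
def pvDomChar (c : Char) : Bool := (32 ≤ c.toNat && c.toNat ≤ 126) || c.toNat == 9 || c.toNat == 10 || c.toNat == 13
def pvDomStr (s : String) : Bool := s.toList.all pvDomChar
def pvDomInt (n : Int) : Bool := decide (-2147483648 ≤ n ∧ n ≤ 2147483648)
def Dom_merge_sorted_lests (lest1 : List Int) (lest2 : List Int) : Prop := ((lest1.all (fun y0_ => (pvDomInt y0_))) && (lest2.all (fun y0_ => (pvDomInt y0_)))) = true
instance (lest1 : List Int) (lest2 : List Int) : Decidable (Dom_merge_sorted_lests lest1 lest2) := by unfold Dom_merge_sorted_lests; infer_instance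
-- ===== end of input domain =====

-- B replaces A's indexed loop with length arithmetic by stack consumption: both lists are
-- reversed into stacks, a while loop pops one element from each and emits min/max, and the
-- surviving stack is reversed back and appended (objective: alternative, same cost).


-- ===== PORT A =====
def merge_sorted_lests (lest1 : List Int) (lest2 : List Int) : List Int :=
  (PySem.List.pyRange 0 (max (lest1.length : Int) (lest2.length : Int)) 1).foldl
    (fun res i =>
      if i < min (lest2.length : Int) (lest1.length : Int) then
        (res ++ [min (PySem.List.pyGetD lest1 i 0) (PySem.List.pyGetD lest2 i 0)])
            ++ [max (PySem.List.pyGetD lest1 i 0) (PySem.List.pyGetD lest2 i 0)]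
      else
        if lest1.length < lest2.length then
          res ++ [PySem.List.pyGetD lest2 i 0]
        else
          res ++ [PySem.List.pyGetD lest1 i 0]) []

-- ===== PORT B =====
-- Source B's while loop: pop (getLastD/dropLast) from both stacks while both are nonempty,
-- appending min then max; returns the final stacks and the accumulated result.
def pvLoopB (s1 s2 res : List Int) : List Int × List Int × List Int :=
  if s1 ≠ [] ∧ s2 ≠ [] then
    let a := s1.getLastD 0
    let b := s2.getLastD 0
    pvLoopB s1.dropLast s2.dropLast ((res ++ [min a b]) ++ [max a b])
  else (s1, s2, res)
termination_by s1.length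
decreasing_by
  rename_i h
  have : s1 ≠ [] := h.1
  cases s1 with
  | nil => exact absurd rfl this
  | cons x t => simp

def merge_sorted_lests_alt (lest1 : List Int) (lest2 : List Int) : List Int :=
  let r := pvLoopB lest1.reverse lest2.reverse []
  let rest := if r.1 ≠ [] then r.1 else r.2.1
  r.2.2 ++ rest.reverse

-- ===== PRECONDITION & SPEC =====
def Spec_merge_sorted_lests (lest1 : List Int) (lest2 : List Int) (out : List Int) : Prop := out = merge_sorted_lests_alt lest1 lest2
instance (lest1 : List Int) (lest2 : List Int) (out : List Int) : Decidable (Spec_merge_sorted_lests lest1 lest2 out) := by unfold Spec_merge_sorted_lests; infer_instance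

-- ===== CLAIM (what is proved, stated in full; the proofs are below) =====
def Claim_equal_merge_sorted_lests : Prop := ∀ (lest1 : List Int) (lest2 : List Int), Dom_merge_sorted_lests lest1 lest2 → Spec_merge_sorted_lests lest1 lest2 (merge_sorted_lests lest1 lest2)

-- ===== LEMMAS AND PROOFS =====

-- A's per-iteration body as a list-valued function of the index
def pvBodyA (lest1 : List Int) (lest2 : List Int) (i : Int) : List Int :=
  if i < min (lest2.length : Int) (lest1.length : Int) then
    [min (PySem.List.pyGetD lest1 i 0) (PySem.List.pyGetD lest2 i 0),
     max (PySem.List.pyGetD lest1 i 0) (PySem.List.pyGetD lest2 i 0)]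
  else
    if lest1.length < lest2.length then [PySem.List.pyGetD lest2 i 0]
    else [PySem.List.pyGetD lest1 i 0]

lemma flatMap_singleton_eq_map (r : List Int) (g : Int → Int) :
    r.flatMap (fun i => [g i]) = r.map g := by
  induction r with
  | nil => simp
  | cons x t ih => simp [ih]

lemma A_eq_flat (lest1 lest2 : List Int) :
    merge_sorted_lests lest1 lest2 =
      (PySem.List.pyRange 0 (max (lest1.length : Int) (lest2.length : Int)) 1).flatMap
        (pvBodyA lest1 lest2) := by
  unfold merge_sorted_lests
  have hf : (fun (res : List Int) (i : Int) =>
      if i < min (lest2.length : Int) (lest1.length : Int) then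
        (res ++ [min (PySem.List.pyGetD lest1 i 0) (PySem.List.pyGetD lest2 i 0)])
            ++ [max (PySem.List.pyGetD lest1 i 0) (PySem.List.pyGetD lest2 i 0)]
      else
        if lest1.length < lest2.length then
          res ++ [PySem.List.pyGetD lest2 i 0]
        else
          res ++ [PySem.List.pyGetD lest1 i 0])
      = (fun res i => res ++ pvBodyA lest1 lest2 i) := by
    funext res i
    simp only [pvBodyA]
    split_ifs <;> simp
  rw [hf, PySem.List.foldl_append_eq_flatMap]
  rw [List.nil_append]

lemma A_nil_left (lest2 : List Int) : merge_sorted_lests [] lest2 = lest2 := by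
  rw [A_eq_flat]
  simp only [List.length_nil, Nat.cast_zero]
  rw [max_eq_right (by positivity)]
  have h : ∀ i ∈ PySem.List.pyRange 0 (lest2.length : Int) 1,
      pvBodyA [] lest2 i = [PySem.List.pyGetD lest2 i 0] := by
    intro i hi
    rw [PySem.List.mem_pyRange_one] at hi
    simp only [pvBodyA, List.length_nil, Nat.cast_zero]
    rw [if_neg (by omega), if_pos (by omega)]
  rw [List.flatMap_congr h, flatMap_singleton_eq_map]
  exact PySem.List.map_pyGetD_pyRange_zero' lest2 0

lemma A_nil_right (lest1 : List Int) : merge_sorted_lests lest1 [] = lest1 := by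
  rw [A_eq_flat]
  simp only [List.length_nil, Nat.cast_zero]
  rw [max_eq_left (by positivity)]
  have h : ∀ i ∈ PySem.List.pyRange 0 (lest1.length : Int) 1,
      pvBodyA lest1 [] i = [PySem.List.pyGetD lest1 i 0] := by
    intro i hi
    rw [PySem.List.mem_pyRange_one] at hi
    simp only [pvBodyA, List.length_nil, Nat.cast_zero]
    rw [if_neg (by omega), if_neg (by omega)]
  rw [List.flatMap_congr h, flatMap_singleton_eq_map]
  exact PySem.List.map_pyGetD_pyRange_zero' lest1 0

lemma A_cons (a b : Int) (lest1 lest2 : List Int) :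
    merge_sorted_lests (a :: lest1) (b :: lest2) =
      min a b :: max a b :: merge_sorted_lests lest1 lest2 := by
  rw [A_eq_flat, A_eq_flat]
  have hmax : (max ((a :: lest1).length : Int) ((b :: lest2).length : Int))
      = (max (lest1.length : Int) (lest2.length : Int)) + 1 := by
    simp only [List.length_cons, Nat.cast_add, Nat.cast_one]; omega
  rw [hmax]
  set N : Int := max (lest1.length : Int) (lest2.length : Int) with hN
  have hN0 : 0 ≤ N := by positivity
  rw [PySem.List.pyRange_one_cons (by omega)]
  rw [List.flatMap_cons]
  have h0 : pvBodyA (a :: lest1) (b :: lest2) 0 = [min a b, max a b] := by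
    simp only [pvBodyA]
    rw [if_pos (by simp only [List.length_cons]; push_cast; omega)]
    simp [PySem.List.pyGetD]
  rw [h0]
  have hshift : (PySem.List.pyRange (0 + 1) (N + 1) 1).flatMap (pvBodyA (a :: lest1) (b :: lest2))
      = (PySem.List.pyRange 0 N 1).flatMap (pvBodyA lest1 lest2) := by
    rw [PySem.List.pyRange_one, PySem.List.pyRange_one]
    have he : (N + 1 - (0 + 1)).toNat = (N - 0).toNat := by omega
    rw [he]
    rw [List.flatMap_map, List.flatMap_map]
    apply List.flatMap_congr
    intro k _
    simp only [zero_add]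
    simp only [pvBodyA, List.length_cons, Nat.cast_add, Nat.cast_one]
    have e1 : PySem.List.pyGetD (a :: lest1) (1 + (k : Int)) 0
        = PySem.List.pyGetD lest1 (k : Int) 0 := by
      have h' : (1 + (k : Int)) = ((k + 1 : Nat) : Int) := by push_cast; ring
      rw [h', PySem.List.pyGetD_natCast, PySem.List.pyGetD_natCast]
      simp
    have e2 : PySem.List.pyGetD (b :: lest2) (1 + (k : Int)) 0
        = PySem.List.pyGetD lest2 (k : Int) 0 := by
      have h' : (1 + (k : Int)) = ((k + 1 : Nat) : Int) := by push_cast; ring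
      rw [h', PySem.List.pyGetD_natCast, PySem.List.pyGetD_natCast]
      simp
    rw [e1, e2]
    by_cases hc : (k : Int) < min (lest2.length : Int) (lest1.length : Int)
    · have hc1 : (1 : Int) + (k : Int) < min ((lest2.length : Int) + 1) ((lest1.length : Int) + 1) := by omega
      rw [if_pos hc1, if_pos hc]
    · have hc1 : ¬ ((1 : Int) + (k : Int) < min ((lest2.length : Int) + 1) ((lest1.length : Int) + 1)) := by omega
      rw [if_neg hc1, if_neg hc]
      by_cases hl : lest1.length < lest2.length
      · have hl1 : lest1.length + 1 < lest2.length + 1 := by omega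
        rw [if_pos hl1, if_pos hl]
      · have hl1 : ¬ (lest1.length + 1 < lest2.length + 1) := by omega
        rw [if_neg hl1, if_neg hl]
  rw [hshift]
  rfl

lemma pvLoopB_nil_left (s2 acc : List Int) : pvLoopB [] s2 acc = ([], s2, acc) := by
  rw [pvLoopB]; simp

lemma pvLoopB_nil_right (s1 acc : List Int) : pvLoopB s1 [] acc = (s1, [], acc) := by
  rw [pvLoopB]; simp

lemma pvLoopB_concat (a b : Int) (t1 t2 acc : List Int) :
    pvLoopB (t1 ++ [a]) (t2 ++ [b]) acc
      = pvLoopB t1 t2 ((acc ++ [min a b]) ++ [max a b]) := by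
  rw [pvLoopB]
  rw [if_pos ⟨by simp, by simp⟩]
  simp

lemma B_nil_left (lest2 : List Int) : merge_sorted_lests_alt [] lest2 = lest2 := by
  unfold merge_sorted_lests_alt
  rw [List.reverse_nil, pvLoopB_nil_left]
  simp

lemma B_nil_right (lest1 : List Int) : merge_sorted_lests_alt lest1 [] = lest1 := by
  unfold merge_sorted_lests_alt
  rw [List.reverse_nil, pvLoopB_nil_right]
  cases lest1 with
  | nil => simp
  | cons x t => simp

lemma pvLoopB_acc (s1 s2 acc : List Int) :
    pvLoopB s1 s2 acc
      = ((pvLoopB s1 s2 []).1, (pvLoopB s1 s2 []).2.1, acc ++ (pvLoopB s1 s2 []).2.2) := by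
  induction hn : s1.length generalizing s1 s2 acc with
  | zero =>
      have : s1 = [] := List.eq_nil_of_length_eq_zero hn
      subst this
      rw [pvLoopB_nil_left, pvLoopB_nil_left]; simp
  | succ n ih =>
      by_cases h : s1 ≠ [] ∧ s2 ≠ []
      · have hdl : s1.dropLast.length = n := by
          have := List.length_dropLast (xs := s1); omega
        rw [pvLoopB, if_pos h]
        conv_rhs => rw [pvLoopB, if_pos h]
        rw [ih _ _ _ hdl, ih _ _ ((([] : List Int) ++ [min (s1.getLastD 0) (s2.getLastD 0)]) ++ [max (s1.getLastD 0) (s2.getLastD 0)]) hdl]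
        simp
      · rw [pvLoopB, if_neg h]
        conv_rhs => rw [pvLoopB, if_neg h]
        simp

lemma B_cons (a b : Int) (lest1 lest2 : List Int) :
    merge_sorted_lests_alt (a :: lest1) (b :: lest2) =
      min a b :: max a b :: merge_sorted_lests_alt lest1 lest2 := by
  unfold merge_sorted_lests_alt
  rw [List.reverse_cons, List.reverse_cons, pvLoopB_concat]
  rw [pvLoopB_acc]
  simp

lemma AB_eq (lest1 lest2 : List Int) :
    merge_sorted_lests lest1 lest2 = merge_sorted_lests_alt lest1 lest2 := by
  induction lest1 generalizing lest2 with
  | nil => rw [A_nil_left, B_nil_left]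
  | cons a t ih =>
      cases lest2 with
      | nil => rw [A_nil_right, B_nil_right]
      | cons b t2 => rw [A_cons, B_cons, ih]

-- ===== VERDICT (by name: the statement is the Claim_ definition above) =====
theorem merge_sorted_lests_spec : Claim_equal_merge_sorted_lests := by
  intro lest1 lest2 _
  exact AB_eq lest1 lest2
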